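-- pv_equiv track=rewrite | github.com/aivaslab/standoff | src/pz_envs/scenario_configs.py | count_knowledge_combinations
-- ===== SOURCE A (Python) =====
-- def count_knowledge_combinations(event_lists, knowledges):
--     counter = {}
--     def tuple_to_key(knowledge_tuple):
--         eb, es, lb, ls = knowledge_tuple
--         if eb and not lb:
--             b_letter = 'F'
--         elif eb and lb:
--             b_letter = 'T'
--         else:
--             b_letter = 'N'
--
--         if es and not ls:
--             s_letter = 'f'
--         elif es and ls:
--             s_letter = 't'
--         else:
--             s_letter = 'n'
--
--         return f'{b_letter}{s_letter}'
--         #mapping = ['eb', 'es', 'lb', 'ls']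
--         #return '-'.join([mapping[i] for i, val in enumerate(knowledge_tuple) if val])
--
--     name_from_knowledge = {}
--     for name in event_lists:
--         key = tuple_to_key(knowledges[name])
--         counter[key] = counter.get(key, 0) + 1
--         if key in name_from_knowledge:
--             name_from_knowledge[key].update({name: event_lists[name]})
--         else:
--             name_from_knowledge[key] = {name: event_lists[name]}
--
--     return counter, name_from_knowledge
-- ===== SOURCE B (Python) =====
-- def count_knowledge_combinations(event_lists, knowledges):
--     def key_of(t):
--         eb, es, lb, ls = t
--         return (('T' if lb else 'F') if eb else 'N') + (('t' if ls else 'f') if es else 'n')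
--
--     tagged = [(name, ev, key_of(knowledges[name])) for name, ev in event_lists.items()]
--     seen = []
--     for _, _, k in tagged:
--         if k not in seen:
--             seen.append(k)
--     counter = {k: sum(1 for _, _, kk in tagged if kk == k) for k in seen}
--     name_from_knowledge = {k: {n: e for n, e, kk in tagged if kk == k} for k in seen}
--     return counter, name_from_knowledge
-- ===== Notes on version B (the rewrite author's own statement) =====
-- stated objective: alternative
-- what changed: B replaces A's single-pass incremental dict aggregation with staged passes: it tags each name with its key, collects the distinct keys in first-occurrence order, then builds the counter and the grouping by a separate filtering scan per distinct key (O(k*n) nested scans instead of hash-map accumulation).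
import Mathlib
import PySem

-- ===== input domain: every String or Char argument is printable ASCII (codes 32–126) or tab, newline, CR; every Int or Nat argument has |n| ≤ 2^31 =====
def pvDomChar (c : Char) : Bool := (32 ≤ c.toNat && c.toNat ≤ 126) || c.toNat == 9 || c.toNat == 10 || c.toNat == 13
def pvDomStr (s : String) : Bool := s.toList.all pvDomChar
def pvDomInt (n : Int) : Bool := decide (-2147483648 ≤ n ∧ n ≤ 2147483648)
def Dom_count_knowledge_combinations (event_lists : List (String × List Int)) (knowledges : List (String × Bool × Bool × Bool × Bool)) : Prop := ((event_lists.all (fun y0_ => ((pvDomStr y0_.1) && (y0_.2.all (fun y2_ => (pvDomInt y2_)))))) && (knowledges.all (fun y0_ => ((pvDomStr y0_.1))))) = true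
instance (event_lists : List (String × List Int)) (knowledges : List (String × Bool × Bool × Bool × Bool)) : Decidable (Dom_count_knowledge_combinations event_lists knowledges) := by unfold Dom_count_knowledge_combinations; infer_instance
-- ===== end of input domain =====

-- B replaces A's single-pass incremental dict aggregation with staged passes: tag every name with its
-- key, collect the distinct keys in first-occurrence order, then build counter and grouping by one
-- filtering scan per distinct key (objective: alternative, same practical cost).

-- ===== PORT A =====
-- tuple_to_key of A, literal if-chain
def pvKeyA (t : Bool × Bool × Bool × Bool) : String :=
  let bL : Char := if t.1 && !t.2.2.1 then 'F' else if t.1 && t.2.2.1 then 'T' else 'N'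
  let sL : Char := if t.2.1 && !t.2.2.2 then 'f' else if t.2.1 && t.2.2.2 then 't' else 'n'
  String.ofList [bL, sL]

-- knowledges[name] raises KeyError on a missing name (excluded by Pre_); under Pre_ the getD default is never used
def count_knowledge_combinations (event_lists : List (String × List Int)) (knowledges : List (String × Bool × Bool × Bool × Bool)) : (List (String × Int)) × (List (String × List (String × List Int))) :=
  let ed := PySem.Dict.ofList event_lists
  let kd := PySem.Dict.ofList knowledges
  let st := ed.items.foldl
    (fun (st : PySem.Dict String Int × PySem.Dict String (PySem.Dict String (List Int))) p =>
      (st.1.insert (pvKeyA (kd.getD p.1 (false, false, false, false)))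
          (st.1.getD (pvKeyA (kd.getD p.1 (false, false, false, false))) 0 + 1),
       if st.2.contains (pvKeyA (kd.getD p.1 (false, false, false, false))) then
         st.2.insert (pvKeyA (kd.getD p.1 (false, false, false, false)))
           ((st.2.getD (pvKeyA (kd.getD p.1 (false, false, false, false))) PySem.Dict.empty).insert p.1 p.2)
       else
         st.2.insert (pvKeyA (kd.getD p.1 (false, false, false, false)))
           (PySem.Dict.empty.insert p.1 p.2)))
    (PySem.Dict.empty, PySem.Dict.empty)
  (st.1.items, st.2.items.map (fun q => (q.1, q.2.items)))

-- ===== PORT B =====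
-- key_of of B: nested conditionals
def pvKeyB (t : Bool × Bool × Bool × Bool) : String :=
  String.ofList [if t.1 then (if t.2.2.1 then 'T' else 'F') else 'N',
             if t.2.1 then (if t.2.2.2 then 't' else 'f') else 'n']

def count_knowledge_combinations_alt (event_lists : List (String × List Int)) (knowledges : List (String × Bool × Bool × Bool × Bool)) : (List (String × Int)) × (List (String × List (String × List Int))) :=
  let ed := PySem.Dict.ofList event_lists
  let kd := PySem.Dict.ofList knowledges
  let tagged := ed.items.map (fun p => (p.1, p.2, pvKeyB (kd.getD p.1 (false, false, false, false))))
  let seen := tagged.foldl (fun (s : List String) t => if s.contains t.2.2 then s else s ++ [t.2.2]) []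
  (seen.map (fun k => (k, tagged.foldl (fun (n : Int) t => if t.2.2 == k then n + 1 else n) 0)),
   seen.map (fun k => (k, (PySem.Dict.ofList ((tagged.filter (fun t => t.2.2 == k)).map (fun t => (t.1, t.2.1)))).items)))

-- ===== PRECONDITION & SPEC =====
-- Pre_ excludes exactly the inputs on which A raises KeyError: a name present in event_lists but missing from knowledges.
def Pre_count_knowledge_combinations (event_lists : List (String × List Int)) (knowledges : List (String × Bool × Bool × Bool × Bool)) : Prop :=
  ∀ p ∈ event_lists, p.1 ∈ knowledges.map Prod.fst
instance (event_lists : List (String × List Int)) (knowledges : List (String × Bool × Bool × Bool × Bool)) : Decidable (Pre_count_knowledge_combinations event_lists knowledges) := by unfold Pre_count_knowledge_combinations; infer_instance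

def pvWitness_count_knowledge_combinations : (List (String × List Int)) × (List (String × Bool × Bool × Bool × Bool)) :=
  ([("a", [1, 2]), ("b", [3])], [("a", (true, false, true, false)), ("b", (false, true, false, true))])

def Spec_count_knowledge_combinations (event_lists : List (String × List Int)) (knowledges : List (String × Bool × Bool × Bool × Bool)) (out : (List (String × Int)) × (List (String × List (String × List Int)))) : Prop := out = count_knowledge_combinations_alt event_lists knowledges
instance (event_lists : List (String × List Int)) (knowledges : List (String × Bool × Bool × Bool × Bool)) (out : (List (String × Int)) × (List (String × List (String × List Int)))) : Decidable (Spec_count_knowledge_combinations event_lists knowledges out) := by unfold Spec_count_knowledge_combinations; infer_instance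

-- ===== CLAIM (what is proved, stated in full; the proofs are below) =====
def Claim_equal_count_knowledge_combinations : Prop := ∀ (event_lists : List (String × List Int)) (knowledges : List (String × Bool × Bool × Bool × Bool)), Dom_count_knowledge_combinations event_lists knowledges → Pre_count_knowledge_combinations event_lists knowledges → Spec_count_knowledge_combinations event_lists knowledges (count_knowledge_combinations event_lists knowledges)

-- ===== LEMMAS AND PROOFS =====

-- the two key helpers agree
theorem pvKey_eq : ∀ t : Bool × Bool × Bool × Bool, pvKeyA t = pvKeyB t := by decide

-- A's if-branched group update is a modify
theorem pvStep_eq (g : PySem.Dict String (PySem.Dict String (List Int))) (key name : String) (ev : List Int) :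
    (if g.contains key then g.insert key ((g.getD key PySem.Dict.empty).insert name ev)
     else g.insert key (PySem.Dict.empty.insert name ev))
    = g.modify key PySem.Dict.empty (fun m => m.insert name ev) := by
  by_cases h : g.contains key
  · simp [PySem.Dict.modify, h]
  · simp only [h, Bool.false_eq_true, if_false, PySem.Dict.modify]
    rw [PySem.Dict.getD_of_not_contains _ _ (by simpa using h)]

-- the group reached by the modify-fold under key k is the insert-fold over the k-filtered sublist
theorem pvGroup (kf : String × List Int → String) :
    ∀ (l : List (String × List Int)) (g : PySem.Dict String (PySem.Dict String (List Int))) (k : String),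
    (l.foldl (fun g p => g.modify (kf p) PySem.Dict.empty (fun m => m.insert p.1 p.2)) g).getD k PySem.Dict.empty
      = (l.filter (fun p => kf p == k)).foldl (fun m p => m.insert p.1 p.2) (g.getD k PySem.Dict.empty) := by
  intro l
  induction l with
  | nil => intro g k; simp
  | cons p t ih =>
    intro g k
    simp only [List.foldl_cons, List.filter_cons]
    rw [ih]
    by_cases h : kf p = k
    · simp [h]
    · have h' : (kf p == k) = false := by simpa using h
      rw [h']
      simp only [Bool.false_eq_true, if_false]
      rw [PySem.Dict.getD_modify, if_neg (fun hh => h hh.symm)]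

-- the whole computation, abstracted over the key function
theorem pvMain (kf : String × List Int → String) (l : List (String × List Int)) :
    (let st := l.foldl
        (fun (st : PySem.Dict String Int × PySem.Dict String (PySem.Dict String (List Int))) p =>
          (st.1.insert (kf p) (st.1.getD (kf p) 0 + 1),
           if st.2.contains (kf p) then
             st.2.insert (kf p) ((st.2.getD (kf p) PySem.Dict.empty).insert p.1 p.2)
           else st.2.insert (kf p) (PySem.Dict.empty.insert p.1 p.2)))
        (PySem.Dict.empty, PySem.Dict.empty)
     (st.1.items, st.2.items.map (fun q => (q.1, q.2.items))))
    = (let tagged := l.map (fun p => (p.1, p.2, kf p))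
       let seen := tagged.foldl (fun (s : List String) t => if s.contains t.2.2 then s else s ++ [t.2.2]) []
       (seen.map (fun k => (k, tagged.foldl (fun (n : Int) t => if t.2.2 == k then n + 1 else n) 0)),
        seen.map (fun k => (k, (PySem.Dict.ofList ((tagged.filter (fun t => t.2.2 == k)).map (fun t => (t.1, t.2.1)))).items)))) := by
  simp only
  rw [PySem.List.foldl_prod_mk
      (fun (c : PySem.Dict String Int) (p : String × List Int) =>
        c.insert (kf p) (c.getD (kf p) 0 + 1))
      (fun (n : PySem.Dict String (PySem.Dict String (List Int))) (p : String × List Int) =>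
        if n.contains (kf p) then n.insert (kf p) ((n.getD (kf p) PySem.Dict.empty).insert p.1 p.2)
        else n.insert (kf p) (PySem.Dict.empty.insert p.1 p.2))]
  have hstep : (fun (n : PySem.Dict String (PySem.Dict String (List Int))) (p : String × List Int) =>
        if n.contains (kf p) then n.insert (kf p) ((n.getD (kf p) PySem.Dict.empty).insert p.1 p.2)
        else n.insert (kf p) (PySem.Dict.empty.insert p.1 p.2))
      = (fun n p => n.modify (kf p) PySem.Dict.empty (fun m => m.insert p.1 p.2)) := by
    funext n p; exact pvStep_eq n (kf p) p.1 p.2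
  rw [hstep]
  -- B's seen is set(l.map kf) in first-occurrence order
  have hseen : (l.map (fun p => (p.1, p.2, kf p))).foldl
      (fun (s : List String) t => if s.contains t.2.2 then s else s ++ [t.2.2]) []
      = PySem.Set.ofList (l.map kf) := by
    rw [show (fun (s : List String) (t : String × List Int × String) =>
          if s.contains t.2.2 then s else s ++ [t.2.2])
        = (fun s t => PySem.Set.add s t.2.2) from rfl]
    rw [List.foldl_map, PySem.Set.ofList_eq_foldl, List.foldl_map]
  rw [hseen]
  set gA := l.foldl
      (fun (g : PySem.Dict String (PySem.Dict String (List Int))) p =>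
        g.modify (kf p) PySem.Dict.empty (fun m => m.insert p.1 p.2)) PySem.Dict.empty with hg
  have hgkeys : gA.keys = PySem.Set.ofList (l.map kf) := by
    rw [hg, PySem.Dict.keys_foldl_modify_key l kf PySem.Dict.empty (fun _ p => fun m => m.insert p.1 p.2)]
    rfl
  have hgnd : gA.keys.Nodup := by rw [hgkeys]; exact PySem.Set.nodup_ofList _
  refine Prod.ext ?_ ?_
  · -- counter component
    have hcounter : (l.foldl (fun (c : PySem.Dict String Int) p => c.insert (kf p) (c.getD (kf p) 0 + 1)) PySem.Dict.empty)
        = PySem.Dict.counter (l.map kf) := by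
      rw [← PySem.Dict.foldl_insert_getD_add_one_eq_counter, List.foldl_map]
    rw [hcounter, PySem.Dict.items_counter]
    refine List.map_congr_left ?_
    intro k _
    rw [show (fun (n : Int) (t : String × List Int × String) => if t.2.2 == k then n + 1 else n)
        = (fun n t => if (fun (t : String × List Int × String) => t.2.2 == k) t then n + 1 else n) from rfl,
      PySem.List.foldl_if_add_one]
    simp [List.countP_map, List.count, Function.comp_def]
  · -- grouping component
    rw [PySem.Dict.items_eq_map_keys gA hgnd PySem.Dict.empty, hgkeys, List.map_map]
    refine List.map_congr_left ?_
    intro k _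
    simp only [Function.comp]
    rw [hg, pvGroup kf l PySem.Dict.empty k, PySem.Dict.getD_empty]
    have hfilt : ((l.map (fun p => (p.1, p.2, kf p))).filter (fun t => t.2.2 == k)).map
          (fun t => (t.1, t.2.1))
        = l.filter (fun p => kf p == k) := by
      rw [List.filter_map, List.map_map]
      simp [Function.comp_def]
    rw [hfilt]
    rfl

-- ===== VERDICT (by name: the statement is the Claim_ definition above) =====
theorem count_knowledge_combinations_spec : Claim_equal_count_knowledge_combinations := by
  intro event_lists knowledges _ _
  unfold Spec_count_knowledge_combinations count_knowledge_combinations count_knowledge_combinations_alt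
  simp only [pvKey_eq]
  exact pvMain
    (fun p => pvKeyB ((PySem.Dict.ofList knowledges).getD p.1 (false, false, false, false)))
    (PySem.Dict.ofList event_lists).items
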